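-- pv_equiv track=rewrite | github.com/khiemledev/bag_ranking_crawler | bag_ranking_crawler/spiders_content/mightychic.py | get_measurements
-- ===== SOURCE A (Python) =====
-- def get_measurements(desc):
--     measurements = []
--     # lines = desc.split('\n')
--     lines = desc
--     lines.append('\n')
--     for i in range(len(lines) - 1):
--         line = lines[i]
--         if "bag measures:" in line.lower():
--             for j in range(i+1, len(lines)):
--                 line2 = lines[j].strip()
--                 if line2 == '' or "condition:" in line2.lower():
--                     break
--                 measurements.append(line2)
--
--     return '\n'.join(measurements)
-- ===== SOURCE B (Python) =====
-- def get_measurements(desc):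
--     lines = desc
--     lines.append('\n')          # same in-place mutation as A
--     n = len(lines)
--     # backward pass: dist[j] = number of lines from j before the first terminator
--     dist = [0] * n
--     for j in range(n - 1, -1, -1):
--         s = lines[j].strip()
--         if s == '' or 'condition:' in s.lower():
--             dist[j] = 0
--         else:
--             dist[j] = dist[j + 1] + 1   # safe: last line is always a terminator
--     out = []
--     for p in range(n - 1):
--         if 'bag measures:' in lines[p].lower():
--             out.extend(s.strip() for s in lines[p + 1:p + 1 + dist[p + 1]])
--     return '\n'.join(out)
-- ===== Notes on version B (the rewrite author's own statement) =====
-- stated objective: alternative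
-- what changed: Replaces A's nested rescanning loop (for each marker line, scan forward until a terminator) with a single backward pass that tabulates, for every position, the distance to the next terminator, so each marker's block is a slice lookup instead of an inner scan.
import Mathlib
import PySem

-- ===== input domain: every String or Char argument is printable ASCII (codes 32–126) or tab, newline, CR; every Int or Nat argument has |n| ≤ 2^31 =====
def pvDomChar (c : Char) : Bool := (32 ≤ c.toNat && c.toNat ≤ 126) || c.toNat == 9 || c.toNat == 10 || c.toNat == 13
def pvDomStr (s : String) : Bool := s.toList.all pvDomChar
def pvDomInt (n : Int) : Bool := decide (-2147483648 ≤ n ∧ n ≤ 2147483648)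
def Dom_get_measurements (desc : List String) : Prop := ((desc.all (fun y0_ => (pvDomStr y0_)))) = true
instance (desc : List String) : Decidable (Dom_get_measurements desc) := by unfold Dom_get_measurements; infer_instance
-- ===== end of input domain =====

-- B replaces A's per-marker forward rescanning with one backward pass tabulating the
-- distance to the next terminator, then a slice per marker; return values are equal.
-- NOTE: both Pythons mutate desc in place (append '\n'); the theorem is about the return value.

-- ===== PORT A =====
-- inner 'for j in range(i+1, len(lines))' loop with its break, over the suffix after the marker
def pvCollectA : List String → List String
  | [] => []
  | l :: rest =>
    let line2 := PySem.Str.strip l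
    if line2 == "" || PySem.Str.isIn "condition:" (PySem.Str.lower line2) then []
    else line2 :: pvCollectA rest

-- outer 'for i in range(len(lines) - 1)' loop (the last, appended line is never tested)
def pvLoopA : List String → List String
  | [] => []
  | [_] => []
  | l :: rest =>
    (if PySem.Str.isIn "bag measures:" (PySem.Str.lower l) then pvCollectA rest else [])
      ++ pvLoopA rest

def get_measurements (desc : List String) : String :=
  PySem.Str.join "\n" (pvLoopA (desc ++ ["\n"]))

-- ===== PORT B =====
-- backward pass: dist[j] = number of lines from j strictly before the first terminator
def pvDistB : List String → List Nat
  | [] => []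
  | l :: rest =>
    let ds := pvDistB rest
    let s := PySem.Str.strip l
    (if s == "" || PySem.Str.isIn "condition:" (PySem.Str.lower s) then 0
     else ds.headD 0 + 1) :: ds

-- forward pass: for each original index, if marker, take the tabulated slice
def pvLoopB : List String → List Nat → List String
  | l :: rest, _ :: ds =>
    if rest.isEmpty then []
    else
      (if PySem.Str.isIn "bag measures:" (PySem.Str.lower l) then
        (rest.take (ds.headD 0)).map PySem.Str.strip
       else []) ++ pvLoopB rest ds
  | _, _ => []

def get_measurements_alt (desc : List String) : String :=
  let lines := desc ++ ["\n"]
  PySem.Str.join "\n" (pvLoopB lines (pvDistB lines))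

-- ===== PRECONDITION & SPEC =====
def Spec_get_measurements (desc : List String) (out : String) : Prop := out = get_measurements_alt desc
instance (desc : List String) (out : String) : Decidable (Spec_get_measurements desc out) := by unfold Spec_get_measurements; infer_instance

-- ===== CLAIM (what is proved, stated in full; the proofs are below) =====
def Claim_equal_get_measurements : Prop := ∀ (desc : List String), Dom_get_measurements desc → Spec_get_measurements desc (get_measurements desc)

-- ===== LEMMAS AND PROOFS =====
-- A's scan-until-terminator over a suffix equals B's tabulated take of that suffix
theorem pvCollectA_eq_take (ls : List String) :
    pvCollectA ls = (ls.take ((pvDistB ls).headD 0)).map PySem.Str.strip := by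
  induction ls with
  | nil => rfl
  | cons l rest ih =>
    simp only [pvCollectA, pvDistB]
    split_ifs with h
    · simp
    · simp [ih]

theorem pvLoopA_eq_pvLoopB (ls : List String) :
    pvLoopA ls = pvLoopB ls (pvDistB ls) := by
  induction ls with
  | nil => rfl
  | cons l rest ih =>
    cases rest with
    | nil => rfl
    | cons r rs =>
      simp only [pvLoopA, pvDistB, pvLoopB, List.isEmpty_cons, pvCollectA_eq_take, ih]
      simp

-- ===== VERDICT (by name: the statement is the Claim_ definition above) =====
theorem get_measurements_spec : Claim_equal_get_measurements := by
  intro desc _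
  unfold Spec_get_measurements get_measurements get_measurements_alt
  rw [pvLoopA_eq_pvLoopB]
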